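-- pv_equiv track=rewrite | github.com/AndreiFlorescu1410/langchain-decorators | src/langchain_decorators/function_decorator.py | parse_function_description_from_docstrings
-- ===== SOURCE A (Python) =====
-- def parse_function_description_from_docstrings(docstring: str) -> str:
--     # we will return first text until first empty line
--
--     lines = docstring.splitlines()
--     description = []
--     for line in lines:
--         line = line.strip()
--         if line:
--             description.append(line)
--         elif description:
--             # if we have already some description, we stop at first empty line ... else continue
--             break
--     return "\n".join(description)
-- ===== SOURCE B (Python) =====
-- def parse_function_description_from_docstrings(docstring: str) -> str:
--     # Flatten-and-search: normalize the docstring into one string of stripped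
--     # lines, trim blank lines at both ends as newline characters, then cut at
--     # the first blank-line separator (two adjacent newlines).
--     normalized = "\n".join(line.strip() for line in docstring.splitlines())
--     body = normalized.strip("\n")
--     i = body.find("\n\n")
--     return body if i == -1 else body[:i]
-- ===== Notes on version B (the rewrite author's own statement) =====
-- stated objective: alternative
-- what changed: Replaced the stateful line loop (append/flag/break) by flatten-and-search: join the stripped lines into one string, strip blank lines at the edges as newline characters, and cut at the first blank-line separator found as a two-newline substring.
import Mathlib
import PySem

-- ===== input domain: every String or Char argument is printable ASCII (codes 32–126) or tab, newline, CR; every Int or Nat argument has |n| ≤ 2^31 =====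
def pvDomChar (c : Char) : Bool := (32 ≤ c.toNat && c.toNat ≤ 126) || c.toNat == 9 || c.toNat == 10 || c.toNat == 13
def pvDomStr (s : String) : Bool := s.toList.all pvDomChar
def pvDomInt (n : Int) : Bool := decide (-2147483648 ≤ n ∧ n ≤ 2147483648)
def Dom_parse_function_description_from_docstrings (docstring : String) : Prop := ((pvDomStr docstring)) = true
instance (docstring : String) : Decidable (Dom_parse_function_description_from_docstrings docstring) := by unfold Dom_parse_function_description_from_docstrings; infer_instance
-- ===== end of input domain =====

-- B replaces A's line loop by flatten-and-search: join stripped lines, strip blank edges as newline chars, cut at the first two-newline separator (alternative decomposition).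


-- ===== PORT A =====
-- the for-loop with the break: recursion over the lines carrying the accumulator 'description'
def pvGoA : List String → List String → List String
  | [], description => description
  | line :: rest, description =>
    let line' := PySem.Str.strip line
    if line' ≠ "" then pvGoA rest (description ++ [line'])
    else if description ≠ [] then description
    else pvGoA rest description

def parse_function_description_from_docstrings (docstring : String) : String :=
  PySem.Str.join "\n" (pvGoA (PySem.Str.splitlines docstring) [])

-- ===== PORT B =====
def parse_function_description_from_docstrings_alt (docstring : String) : String :=
  let normalized := PySem.Str.join "\n" ((PySem.Str.splitlines docstring).map PySem.Str.strip)
  let body := PySem.Str.stripChars normalized "\n"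
  let i := PySem.Str.find body "\n\n"
  if i = -1 then body else PySem.Str.slice body none (some i)

-- ===== PRECONDITION & SPEC =====
def Spec_parse_function_description_from_docstrings (docstring : String) (out : String) : Prop := out = parse_function_description_from_docstrings_alt docstring
instance (docstring : String) (out : String) : Decidable (Spec_parse_function_description_from_docstrings docstring out) := by unfold Spec_parse_function_description_from_docstrings; infer_instance

-- ===== CLAIM (what is proved, stated in full; the proofs are below) =====
def Claim_equal_parse_function_description_from_docstrings : Prop := ∀ (docstring : String), Dom_parse_function_description_from_docstrings docstring → Spec_parse_function_description_from_docstrings docstring (parse_function_description_from_docstrings docstring)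

-- ===== LEMMAS AND PROOFS =====

-- A-side: once the accumulator is non-empty, the loop appends exactly the first non-blank run
theorem pvGoA_nonempty (lines : List String) : ∀ acc : List String, acc ≠ [] →
    pvGoA lines acc = acc ++ (lines.map PySem.Str.strip).takeWhile (fun s => s != "") := by
  induction lines with
  | nil => intro acc _; simp [pvGoA]
  | cons l rest ih =>
    intro acc hacc
    simp only [pvGoA, List.map_cons, List.takeWhile_cons]
    by_cases h : PySem.Str.strip l = ""
    · simp [h, hacc]
    · rw [if_pos h, ih (acc ++ [PySem.Str.strip l]) (by simp)]
      simp [h, bne]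

-- A-side: with an empty accumulator, the loop first skips blanks, then collects the run
theorem pvGoA_nil (lines : List String) :
    pvGoA lines [] = ((lines.map PySem.Str.strip).dropWhile (fun s => s == "")).takeWhile (fun s => s != "") := by
  induction lines with
  | nil => simp [pvGoA]
  | cons l rest ih =>
    simp only [pvGoA, List.map_cons, List.dropWhile_cons]
    by_cases h : PySem.Str.strip l = ""
    · simpa [h] using ih
    · rw [if_pos h, show ([] ++ [PySem.Str.strip l]) = [PySem.Str.strip l] from rfl,
        pvGoA_nonempty rest [PySem.Str.strip l] (by simp)]
      simp [h, bne]

-- abbreviations for the chars-level reasoning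
def pvNL : List Char := ['\n']
def pvNN : List Char := ['\n', '\n']
def pvClean (p : List Char) : Prop := '\n' ∉ p

-- join over a cons with a nonempty tail
theorem pvJoin_cons (t : List Char) (rest : List (List Char)) (h : rest ≠ []) :
    PySem.Chars.join pvNL (t :: rest) = t ++ '\n' :: PySem.Chars.join pvNL rest := by
  cases rest with
  | nil => exact absurd rfl h
  | cons r rs => rw [PySem.Chars.join_cons_cons]; simp [pvNL]

-- join over an append of two nonempty lists
theorem pvJoin_append (xs ys : List (List Char)) (hx : xs ≠ []) (hy : ys ≠ []) :
    PySem.Chars.join pvNL (xs ++ ys) = PySem.Chars.join pvNL xs ++ '\n' :: PySem.Chars.join pvNL ys := by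
  induction xs with
  | nil => exact absurd rfl hx
  | cons x xs ih =>
    cases xs with
    | nil => simpa [PySem.Chars.join_singleton] using pvJoin_cons x ys hy
    | cons x' xs' =>
      rw [List.cons_append, pvJoin_cons _ _ (by simp), pvJoin_cons _ _ (by simp), ih (by simp)]
      simp

-- stripping leading newlines from a join of newline-free pieces drops the leading empty pieces
theorem pvDropWhile_join (ss : List (List Char)) (h : ∀ p ∈ ss, pvClean p) :
    (PySem.Chars.join pvNL ss).dropWhile (fun c => c == '\n')
      = PySem.Chars.join pvNL (ss.dropWhile List.isEmpty) := by
  induction ss with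
  | nil => simp [PySem.Chars.join_nil]
  | cons t rest ih =>
    by_cases ht : t = []
    · subst ht
      cases rest with
      | nil => simp [PySem.Chars.join_singleton, PySem.Chars.join_nil]
      | cons r rs =>
        have h2 := ih (fun p hp => h p (List.mem_cons_of_mem _ hp))
        rw [pvJoin_cons _ _ (by simp)]
        simpa using h2
    · have hhd : t.head ht ≠ '\n' := by
        intro hc; exact h t (List.mem_cons_self) (hc ▸ List.head_mem ht)
      cases rest with
      | nil =>
        simp only [PySem.Chars.join_singleton]
        obtain ⟨c, cs, rfl⟩ := List.exists_cons_of_ne_nil ht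
        have : (c == '\n') = false := by simpa using hhd
        simp [this]
      | cons r rs =>
        rw [pvJoin_cons _ _ (by simp)]
        obtain ⟨c, cs, rfl⟩ := List.exists_cons_of_ne_nil ht
        have : (c == '\n') = false := by simpa using hhd
        simp [this, pvJoin_cons]

-- reversing a join reverses the pieces and their order
theorem pvJoin_reverse (ss : List (List Char)) :
    (PySem.Chars.join pvNL ss).reverse = PySem.Chars.join pvNL ((ss.map List.reverse).reverse) := by
  induction ss with
  | nil => simp [PySem.Chars.join_nil]
  | cons t rest ih =>
    cases rest with
    | nil => simp [PySem.Chars.join_singleton]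
    | cons r rs =>
      rw [pvJoin_cons _ _ (by simp)]
      have hne : ((r :: rs).map List.reverse).reverse ≠ [] := by simp
      rw [List.map_cons, List.reverse_cons, pvJoin_append _ _ hne (by simp),
        PySem.Chars.join_singleton, ← ih]
      simp

-- stripChars "\n" on a join of newline-free pieces trims the empty pieces at both ends
theorem pvStrip_join (ss : List (List Char)) (h : ∀ p ∈ ss, pvClean p) :
    PySem.Chars.stripChars (PySem.Chars.join pvNL ss) pvNL
      = PySem.Chars.join pvNL (((ss.dropWhile List.isEmpty).reverse.dropWhile List.isEmpty).reverse) := by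
  have hp : (fun c => pvNL.contains c) = (fun c => c == '\n') := by
    funext c; simp [pvNL, BEq.beq]
  simp only [PySem.Chars.stripChars, hp]
  set L := ss.dropWhile List.isEmpty with hL
  have hLclean : ∀ p ∈ L, pvClean p := fun p hp' => h p (List.dropWhile_sublist _ |>.mem hp')
  rw [pvDropWhile_join ss h, ← hL, pvJoin_reverse L]
  have hrevclean : ∀ p ∈ (L.map List.reverse).reverse, pvClean p := by
    intro p hp'
    simp only [List.mem_reverse, List.mem_map] at hp'
    obtain ⟨q, hq, rfl⟩ := hp'
    simpa [pvClean] using hLclean q hq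
  rw [pvDropWhile_join _ hrevclean, pvJoin_reverse]
  congr 1
  rw [show (L.map List.reverse).reverse = L.reverse.map List.reverse by simp [List.map_reverse],
    List.dropWhile_map]
  have : (List.isEmpty ∘ List.reverse : List Char → Bool) = List.isEmpty := by
    funext l; simp
  rw [this]
  simp [List.map_map]

-- an occurrence of the two-newline pattern at offset j means two adjacent newline characters
theorem pvPrefixDrop (cs : List Char) (j : Nat) (h : pvNN <+: cs.drop j) :
    cs[j]? = some '\n' ∧ cs[j+1]? = some '\n' := by
  obtain ⟨k, hk⟩ := h
  have h0 : (cs.drop j)[0]? = some '\n' := by rw [← hk]; rfl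
  have h1 : (cs.drop j)[1]? = some '\n' := by rw [← hk]; rfl
  rw [List.getElem?_drop] at h0 h1
  exact ⟨h0, h1⟩

-- a join of newline-free pieces, all nonempty except possibly the last, has no two adjacent newlines
theorem pvNoAdjIdx (ts : List (List Char)) (hc : ∀ p ∈ ts, pvClean p)
    (hne : ∀ p ∈ ts.dropLast, p ≠ []) :
    ∀ j : Nat, ¬ ((PySem.Chars.join pvNL ts)[j]? = some '\n' ∧ (PySem.Chars.join pvNL ts)[j+1]? = some '\n') := by
  induction ts with
  | nil => intro j h; simp [PySem.Chars.join_nil] at h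
  | cons t rest ih =>
    intro j h
    cases rest with
    | nil =>
      rw [PySem.Chars.join_singleton] at h
      have : '\n' ∈ t := List.mem_of_getElem? h.1
      exact hc t (List.mem_cons_self) this
    | cons r rs =>
      rw [pvJoin_cons _ _ (by simp)] at h
      have htne : t ≠ [] := hne t (by simp)
      have htclean : pvClean t := hc t (List.mem_cons_self)
      set J := PySem.Chars.join pvNL (r :: rs) with hJ
      rcases Nat.lt_trichotomy j t.length with hj | hj | hj
      · -- cs[j] is a char of t
        rw [List.getElem?_append_left hj] at h
        exact htclean (List.mem_of_getElem? h.1)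
      · -- cs[j] is the separator; cs[j+1] is the head of J
        have h2 := h.2
        rw [hj, List.getElem?_append_right (by omega)] at h2
        have hJ0 : J[0]? = some '\n' := by
          have : t.length + 1 - t.length = 1 := by omega
          simpa [this] using h2
        -- head of J is the head of r (or J = [] when r :: rs = [[]])
        cases rs with
        | nil =>
          rw [hJ, PySem.Chars.join_singleton] at hJ0
          exact hc r (by simp) (List.mem_of_getElem? hJ0)
        | cons r' rs' =>
          have hrne : r ≠ [] := hne r (by simp)
          rw [hJ, pvJoin_cons _ _ (by simp)] at hJ0
          obtain ⟨c, cs', rfl⟩ := List.exists_cons_of_ne_nil hrne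
          have : c = '\n' := by simpa using hJ0
          exact hc (c :: cs') (by simp) (by simp [this])
      · -- both positions are inside J
        have h1 := h.1
        have h2 := h.2
        rw [List.getElem?_append_right (by omega)] at h1 h2
        have hsep : t.length + 1 ≤ j := by omega
        rcases Nat.exists_eq_add_of_le hsep with ⟨j', rfl⟩
        have e1 : t.length + 1 + j' - t.length = j' + 1 := by omega
        have e2 : t.length + 1 + j' + 1 - t.length = j' + 2 := by omega
        rw [e1] at h1; rw [e2] at h2
        -- so J[j'+1-1]? ... shift: J[j']?/J[j'+1]? after peeling the separator
        have hsepJ : ('\n' :: J)[j' + 1]? = J[j']? := rfl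
        have hsepJ2 : ('\n' :: J)[j' + 2]? = J[j' + 1]? := rfl
        rw [hsepJ] at h1; rw [hsepJ2] at h2
        exact ih (fun p hp => hc p (List.mem_cons_of_mem _ hp))
          (by intro p hp
              exact hne p (by simpa [List.dropLast_cons_of_ne_nil] using List.mem_cons_of_mem t hp))
          j' ⟨h1, h2⟩

theorem pvNoAdj (ts : List (List Char)) (hc : ∀ p ∈ ts, pvClean p)
    (hne : ∀ p ∈ ts.dropLast, p ≠ []) :
    ∀ j, ¬ pvNN <+: (PySem.Chars.join pvNL ts).drop j := by
  intro j h
  exact pvNoAdjIdx ts hc hne j (pvPrefixDrop _ _ h)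

-- the B-side core: strip/find/cut on the joined string equals take-until-first-empty on the pieces
theorem pvCut (ts : List (List Char)) (hc : ∀ p ∈ ts, pvClean p)
    (hh : ∀ h : ts ≠ [], ts.head h ≠ []) (hl : ∀ h : ts ≠ [], ts.getLast h ≠ []) :
    (let cs := PySem.Chars.join pvNL ts
     let i := PySem.Chars.find cs pvNN
     if i = -1 then cs else PySem.Chars.slice cs none (some i))
      = PySem.Chars.join pvNL (ts.takeWhile (fun l => !l.isEmpty)) := by
  show (if PySem.Chars.find (PySem.Chars.join pvNL ts) pvNN = -1
      then PySem.Chars.join pvNL ts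
      else PySem.Chars.slice (PySem.Chars.join pvNL ts) none (some (PySem.Chars.find (PySem.Chars.join pvNL ts) pvNN)))
      = _
  rcases eq_or_ne ts [] with rfl | hts
  · have hf : PySem.Chars.find (PySem.Chars.join pvNL []) pvNN = -1 := by decide
    rw [if_pos hf]; rfl
  by_cases hall : ∀ p ∈ ts, p ≠ []
  · -- no blank piece: nothing is cut
    have hfind : PySem.Chars.find (PySem.Chars.join pvNL ts) pvNN = -1 := by
      by_contra hne1
      have h0 : 0 ≤ PySem.Chars.find (PySem.Chars.join pvNL ts) pvNN := by
        have := PySem.Chars.neg_one_le_find (PySem.Chars.join pvNL ts) pvNN; omega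
      obtain ⟨l₁, l₂, hic⟩ := (PySem.Chars.find_nonneg_iff _ _).mp h0
      have hpre : pvNN <+: (PySem.Chars.join pvNL ts).drop l₁.length := by
        refine ⟨l₂, ?_⟩
        rw [← hic, List.append_assoc, List.drop_left]
      exact pvNoAdj ts hc
        (fun p hp => hall p ((List.dropLast_sublist _).mem hp)) l₁.length hpre
    rw [if_pos hfind, List.takeWhile_eq_self_iff.mpr ?_]
    intro x hx
    simpa using hall _ hx
  · -- there is a blank piece: the join contains two adjacent newlines and is cut at the first one
    push Not at hall
    set p : List Char → Bool := fun l => !l.isEmpty with hp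
    set t₁ := ts.takeWhile p with ht₁
    set rest := ts.dropWhile p with hrest
    have hsplit : ts = t₁ ++ rest := (List.takeWhile_append_dropWhile).symm
    have hrest_ne : rest ≠ [] := by
      intro h0
      obtain ⟨q, hq, hq0⟩ := hall
      have : ts = t₁ := by rw [hsplit, h0, List.append_nil]
      have := List.mem_takeWhile_imp (this ▸ hq)
      simp [hp, hq0] at this
    have hhead0 : rest.head hrest_ne = [] := by
      have := List.head_dropWhile_not p (l := ts) (by rw [← hrest]; exact hrest_ne)
      simpa [hp] using this
    obtain ⟨r₀, t₂, hr⟩ := List.exists_cons_of_ne_nil hrest_ne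
    have hr0 : r₀ = [] := by
      have h9 : rest.head? = some [] := by
        rw [List.head?_eq_some_head hrest_ne, hhead0]
      rw [hr] at h9
      simpa using h9.symm
    subst hr0
    have ht₂ne : t₂ ≠ [] := by
      intro h0
      have h9 : ts.getLast? = some [] := by
        rw [hsplit, hr, h0]; exact List.getLast?_concat
      have h10 := List.getLast?_eq_some_getLast hts
      rw [h10] at h9
      injection h9 with h9
      exact hl hts h9
    have ht₁ne : t₁ ≠ [] := by
      obtain ⟨h₀, tl, rfl⟩ := List.exists_cons_of_ne_nil hts
      have hh0 : h₀ ≠ [] := hh (by simp)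
      rw [ht₁, List.takeWhile_cons, if_pos (by simpa [hp] using hh0)]
      simp
    have ht₁clean : ∀ q ∈ t₁, pvClean q :=
      fun q hq => hc q ((List.takeWhile_sublist _).mem hq)
    have ht₁nonempty : ∀ q ∈ t₁, q ≠ [] := by
      intro q hq
      have := List.mem_takeWhile_imp hq
      simpa [hp] using this
    have ht₂clean : ∀ q ∈ t₂, pvClean q := by
      intro q hq
      exact hc q (by rw [hsplit, hr]; exact List.mem_append_right _ (List.mem_cons_of_mem _ hq))
    set J₁ := PySem.Chars.join pvNL t₁ with hJ₁
    set J₂ := PySem.Chars.join pvNL t₂ with hJ₂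
    have hcs : PySem.Chars.join pvNL ts = J₁ ++ '\n' :: '\n' :: J₂ := by
      rw [hsplit, hr, pvJoin_append t₁ _ ht₁ne (by simp), pvJoin_cons [] t₂ ht₂ne]
      rfl
    set m := J₁.length with hm
    have hocc : pvNN <+: (PySem.Chars.join pvNL ts).drop m := by
      rw [hcs, hm, List.drop_left]
      exact ⟨J₂, rfl⟩
    have hW : J₁ ++ ['\n'] = PySem.Chars.join pvNL (t₁ ++ [[]]) := by
      rw [pvJoin_append t₁ [[]] ht₁ne (by simp)]
      rfl
    have hmin : ∀ jj, jj < m → ¬ pvNN <+: (PySem.Chars.join pvNL ts).drop jj := by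
      intro jj hjj hpre
      obtain ⟨h1, h2⟩ := pvPrefixDrop _ _ hpre
      have hcs2 : PySem.Chars.join pvNL ts = (J₁ ++ ['\n']) ++ '\n' :: J₂ := by
        rw [hcs]; simp
      rw [hcs2, List.getElem?_append_left (by simp [hm] at hjj ⊢; omega)] at h1
      rw [hcs2, List.getElem?_append_left (by simp [hm] at hjj ⊢; omega)] at h2
      rw [hW] at h1 h2
      refine pvNoAdjIdx (t₁ ++ [[]]) ?_ ?_ jj ⟨h1, h2⟩
      · intro q hq
        rcases List.mem_append.mp hq with h' | h'
        · exact ht₁clean q h'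
        · simp only [List.mem_singleton] at h'; subst h'; simp [pvClean]
      · intro q hq
        rw [List.dropLast_concat] at hq
        exact ht₁nonempty q hq
    set f := PySem.Chars.find (PySem.Chars.join pvNL ts) pvNN with hf
    have h0f : 0 ≤ f := by
      rw [hf, PySem.Chars.find_nonneg_iff]
      exact ⟨J₁, J₂, by rw [hcs]; simp [pvNN]⟩
    obtain ⟨hfpre, hfmin⟩ := PySem.Chars.find_spec h0f
    have hfm : f.toNat = m := by
      rcases Nat.lt_trichotomy f.toNat m with h' | h' | h'
      · exact absurd hfpre (hmin _ h')
      · exact h'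
      · exact absurd hocc (hfmin m h')
    have hfne : f ≠ -1 := by omega
    rw [if_neg hfne]
    have : PySem.Chars.slice (PySem.Chars.join pvNL ts) none (some f)
        = (PySem.Chars.join pvNL ts).take f.toNat := by
      rw [PySem.Chars.slice_eq_listSlice]
      exact PySem.List.slice_to _ h0f
    rw [this, hfm, hcs, hm, List.take_left]

-- takeWhile is unaffected by removing a failing suffix
theorem pvTakeWhile_rdrop {α : Type} (p : α → Bool) (l : List α) :
    (((l.reverse.dropWhile (fun x => !p x)).reverse).takeWhile p) = l.takeWhile p := by
  set q : α → Bool := fun x => !p x with hq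
  have hdec : l = (l.reverse.dropWhile q).reverse ++ (l.reverse.takeWhile q).reverse := by
    have h0 : (List.takeWhile q l.reverse ++ List.dropWhile q l.reverse).reverse = l := by
      rw [List.takeWhile_append_dropWhile]; simp
    conv_lhs => rw [← h0, List.reverse_append]
  set u := (l.reverse.dropWhile q).reverse
  set sfx := (l.reverse.takeWhile q).reverse with hsfx
  have hsfxq : ∀ x ∈ sfx, p x = false := by
    intro x hx
    have := List.mem_takeWhile_imp (List.mem_reverse.mp hx)
    simpa [hq] using this
  conv_rhs => rw [hdec]
  rw [List.takeWhile_append]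
  split
  · rename_i hlen
    have hu : u.takeWhile p = u := (List.takeWhile_prefix p).eq_of_length hlen
    cases hsf : sfx with
    | nil => simp [hu]
    | cons a s' =>
      have : p a = false := hsfxq a (by simp [hsf])
      simp [hu, this]
  · rfl

-- pieces produced by splitlines contain no newline
theorem pvGo_clean (isB : Char → Bool) (s cur : List Char) (acc : List (List Char))
    (hcur : ∀ c ∈ cur, isB c = false)
    (hacc : ∀ p ∈ acc, ∀ c ∈ p, isB c = false) :
    ∀ p ∈ PySem.Chars.splitlines.go isB s cur acc, ∀ c ∈ p, isB c = false := by
  fun_induction PySem.Chars.splitlines.go isB s cur acc with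
  | case1 cur acc h =>
    intro p hp c hc
    exact hacc p (List.mem_reverse.mp hp) c hc
  | case2 cur acc h =>
    intro p hp c hc
    simp only [List.mem_reverse, List.mem_cons] at hp
    rcases hp with h' | h'
    · subst h'; exact hcur c (List.mem_reverse.mp hc)
    · exact hacc p h' c hc
  | case3 rest cur acc ih =>
    refine ih (by simp) ?_
    intro p hp c hc
    rcases List.mem_cons.mp hp with h' | h'
    · subst h'; exact hcur c (List.mem_reverse.mp hc)
    · exact hacc p h' c hc
  | case4 c rest cur acc hx hB ih =>
    refine ih (by simp) ?_
    intro p hp c' hc'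
    rcases List.mem_cons.mp hp with h' | h'
    · subst h'; exact hcur c' (List.mem_reverse.mp hc')
    · exact hacc p h' c' hc'
  | case5 c rest cur acc hx hB ih =>
    refine ih ?_ hacc
    intro c' hc'
    rcases List.mem_cons.mp hc' with h' | h'
    · subst h'; simpa using hB
    · exact hcur c' h'

theorem pvSplitlines_clean (cs : List Char) :
    ∀ p ∈ PySem.Chars.splitlines cs, pvClean p := by
  intro p hp hmem
  unfold PySem.Chars.splitlines at hp
  have := pvGo_clean _ cs [] [] (by simp) (by simp) p hp '\n' hmem
  simp at this

-- ===== VERDICT (by name: the statement is the Claim_ definition above) =====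
-- characters of a stripped piece are characters of the piece
theorem pvMem_strip {c : Char} {q : List Char} (h : c ∈ PySem.Chars.strip q) : c ∈ q := by
  unfold PySem.Chars.strip PySem.Chars.rstrip PySem.Chars.lstrip at h
  have h1 := List.mem_reverse.mp h
  have h2 := (List.dropWhile_sublist _).mem h1
  have h3 := List.mem_reverse.mp h2
  exact (List.dropWhile_sublist _).mem h3

theorem pvOfList_beq_empty : (fun l : List Char => (String.ofList l == "")) = List.isEmpty := by
  funext l
  rcases l with _ | ⟨c, cs⟩
  · rfl
  · simp only [List.isEmpty_cons]
    rw [beq_eq_false_iff_ne]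
    intro hcontra
    have := congrArg String.toList hcontra
    simp at this

theorem parse_function_description_from_docstrings_spec : Claim_equal_parse_function_description_from_docstrings := by
  intro d _
  unfold Spec_parse_function_description_from_docstrings parse_function_description_from_docstrings parse_function_description_from_docstrings_alt
  rw [pvGoA_nil]
  refine String.toList_inj.mp ?_
  set ss := (PySem.Chars.splitlines d.toList).map PySem.Chars.strip with hss
  have hssclean : ∀ p ∈ ss, pvClean p := by
    intro p hp hmem
    rw [hss] at hp
    simp only [List.mem_map] at hp
    obtain ⟨q, hq, rfl⟩ := hp
    exact pvSplitlines_clean d.toList q hq (pvMem_strip hmem)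
  have hmapss : (PySem.Str.splitlines d).map PySem.Str.strip = ss.map String.ofList := by
    simp [PySem.Str.splitlines, PySem.Str.strip, hss, List.map_map, Function.comp_def]
  have hnl : ("\n" : String).toList = pvNL := rfl
  have hnn : ("\n\n" : String).toList = pvNN := rfl
  have hjoin : ∀ X : List (List Char), (PySem.Str.join "\n" (X.map String.ofList)).toList
      = PySem.Chars.join pvNL X := by
    intro X
    simp [PySem.Str.join, List.map_map, Function.comp_def, hnl]
  have hpe : ((fun s : String => s == "") ∘ String.ofList) = List.isEmpty := by
    rw [← pvOfList_beq_empty]; rfl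
  have hpn : ((fun s : String => s != "") ∘ String.ofList) = (fun l => !l.isEmpty) := by
    funext l
    simp only [Function.comp_apply, bne]
    rw [← pvOfList_beq_empty]
  -- the A side
  have hA : (PySem.Str.join "\n" ((((PySem.Str.splitlines d).map PySem.Str.strip).dropWhile
        (fun s => s == "")).takeWhile (fun s => s != ""))).toList
      = PySem.Chars.join pvNL ((ss.dropWhile List.isEmpty).takeWhile (fun l => !l.isEmpty)) := by
    rw [hmapss, List.dropWhile_map, List.takeWhile_map, hpe, hpn, hjoin]
  rw [hA]
  -- the B side
  set L := ss.dropWhile List.isEmpty with hL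
  set ts := (L.reverse.dropWhile List.isEmpty).reverse with hts
  have htsclean : ∀ p ∈ ts, pvClean p := by
    intro p hp
    refine hssclean p ?_
    have h1 := List.mem_reverse.mp hp
    have h2 := (List.dropWhile_sublist _).mem h1
    exact (List.dropWhile_sublist _).mem (List.mem_reverse.mp h2)
  have htsprefix : ts <+: L := by
    rw [hts]
    exact List.rdropWhile_prefix List.isEmpty L
  have hth : ∀ h : ts ≠ [], ts.head h ≠ [] := by
    intro h
    have hLne : L ≠ [] := by
      intro h0; rw [h0] at htsprefix
      exact h (List.prefix_nil.mp htsprefix)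
    rw [htsprefix.head h]
    have := List.head_dropWhile_not List.isEmpty (l := ss) (by rw [← hL]; exact hLne)
    intro hcontra
    rw [show (ss.dropWhile List.isEmpty).head hLne = L.head hLne from rfl, hcontra] at this
    simp at this
  have htl : ∀ h : ts ≠ [], ts.getLast h ≠ [] := by
    intro h hcontra
    have hd : L.reverse.dropWhile List.isEmpty ≠ [] := by
      intro h0; rw [hts, h0] at h; exact h rfl
    have h9 : ts.getLast? = (L.reverse.dropWhile List.isEmpty).head? := by
      rw [hts, List.getLast?_reverse]
    have h10 : ts.getLast? = some (ts.getLast h) := List.getLast?_eq_some_getLast h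
    rw [h10, List.head?_eq_some_head hd] at h9
    have := List.head_dropWhile_not List.isEmpty (l := L.reverse) hd
    injection h9 with h9
    rw [← h9, hcontra] at this
    simp at this
  -- normalized, body, find, slice — all at the chars level
  have hnorm : (PySem.Str.join "\n" ((PySem.Str.splitlines d).map PySem.Str.strip)).toList
      = PySem.Chars.join pvNL ss := by
    rw [hmapss, hjoin]
  have hbody : (PySem.Str.stripChars (PySem.Str.join "\n" ((PySem.Str.splitlines d).map PySem.Str.strip)) "\n").toList
      = PySem.Chars.join pvNL ts := by
    simp only [PySem.Str.stripChars, String.toList_ofList, hnorm, hnl]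
    rw [pvStrip_join ss hssclean, ← hL, ← hts]
  have hfindB : PySem.Str.find (PySem.Str.stripChars (PySem.Str.join "\n" ((PySem.Str.splitlines d).map PySem.Str.strip)) "\n") "\n\n"
      = PySem.Chars.find (PySem.Chars.join pvNL ts) pvNN := by
    simp only [PySem.Str.find, hbody, hnn]
  have hslice : ∀ i : Int, (PySem.Str.slice (PySem.Str.stripChars (PySem.Str.join "\n" ((PySem.Str.splitlines d).map PySem.Str.strip)) "\n") none (some i)).toList
      = PySem.Chars.slice (PySem.Chars.join pvNL ts) none (some i) := by
    intro i
    simp only [PySem.Str.slice, String.toList_ofList]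
    rw [show PySem.Chars.slice ((PySem.Str.stripChars (PySem.Str.join "\n" ((PySem.Str.splitlines d).map PySem.Str.strip)) "\n").toList) none (some i)
        = PySem.Chars.slice (PySem.Chars.join pvNL ts) none (some i) from by rw [hbody]]
  have hcut := pvCut ts htsclean hth htl
  simp only [] at hcut
  have hTW : ts.takeWhile (fun l => !l.isEmpty) = L.takeWhile (fun l => !l.isEmpty) := by
    have := pvTakeWhile_rdrop (fun l : List Char => !l.isEmpty) L
    rw [hts]
    rw [show (fun l : List Char => !!l.isEmpty) = List.isEmpty from funext fun l => Bool.not_not _] at this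
    exact this
  rw [apply_ite String.toList, hfindB, hslice, hbody, hcut, hTW]
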